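-- pv_equiv track=rewrite | github.com/Alvaropz/Python_problems_BinarySearch | 1. Easy/verify_max_heap/verify_max_heap.py | verify_max_heap
-- ===== SOURCE A (Python) =====
-- def verify_max_heap(nums):
--     lenght_nums = len(nums)
--     for idx in range(int(len(nums)/2)):
--         plus_two = (2*idx)+2
--         plus_one = (2*idx)+1
--         if plus_one < lenght_nums and nums[idx] < nums[plus_one]:
--             return False
--         elif plus_two < lenght_nums and nums[idx] < nums[plus_two]:
--             return False
--     return True
-- ===== SOURCE B (Python) =====
-- def verify_max_heap(nums):
--     return all(not (nums[(i - 1) // 2] < nums[i]) for i in range(1, len(nums)))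
-- ===== Notes on version B (the rewrite author's own statement) =====
-- stated objective: idiomatic
-- what changed: B iterates over child indices 1..n-1 and compares each element with its derived parent (i-1)//2 in a single all(...) expression, instead of A's loop over parent indices with two explicit child-offset checks and early returns.
import Mathlib
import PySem

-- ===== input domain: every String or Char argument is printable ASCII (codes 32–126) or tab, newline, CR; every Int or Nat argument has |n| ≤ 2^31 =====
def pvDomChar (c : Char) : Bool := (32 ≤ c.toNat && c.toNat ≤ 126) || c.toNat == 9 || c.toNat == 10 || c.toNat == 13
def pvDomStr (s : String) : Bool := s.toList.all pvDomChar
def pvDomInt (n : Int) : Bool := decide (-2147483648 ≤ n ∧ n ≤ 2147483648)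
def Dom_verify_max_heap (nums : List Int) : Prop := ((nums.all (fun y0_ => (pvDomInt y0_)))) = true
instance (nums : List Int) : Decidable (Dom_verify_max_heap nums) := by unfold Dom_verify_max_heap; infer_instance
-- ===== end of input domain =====

-- B re-checks the same max-heap property by iterating over child indices and deriving the parent as (i-1)//2 in one all(...) expression (objective: idiomatic; no speed claim).


-- ===== PORT A =====
-- early-return loop of A: recursion over the parent-index range, state-free
def vmhGo (nums : List Int) (n : Int) : List Int → Bool
  | [] => true
  | idx :: rest =>
    let plus_two := 2*idx+2
    let plus_one := 2*idx+1
    if plus_one < n ∧ PySem.List.pyGetD nums idx 0 < PySem.List.pyGetD nums plus_one 0 then false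
    else if plus_two < n ∧ PySem.List.pyGetD nums idx 0 < PySem.List.pyGetD nums plus_two 0 then false
    else vmhGo nums n rest

-- int(len(nums)/2) = len(nums) // 2 since len(nums) ≥ 0; indices are always in range, so pyGetD is exact
def verify_max_heap (nums : List Int) : Bool :=
  vmhGo nums (nums.length : Int) (PySem.List.pyRange 0 ((nums.length : Int) / 2) 1)

-- ===== PORT B =====
def verify_max_heap_alt (nums : List Int) : Bool :=
  (PySem.List.pyRange 1 (nums.length : Int) 1).all
    (fun i => !(decide (PySem.List.pyGetD nums (PySem.Int.floordiv (i-1) 2) 0 < PySem.List.pyGetD nums i 0)))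

-- ===== PRECONDITION & SPEC =====
def Spec_verify_max_heap (nums : List Int) (out : Bool) : Prop := out = verify_max_heap_alt nums
instance (nums : List Int) (out : Bool) : Decidable (Spec_verify_max_heap nums out) := by unfold Spec_verify_max_heap; infer_instance

-- ===== CLAIM (what is proved, stated in full; the proofs are below) =====
def Claim_equal_verify_max_heap : Prop := ∀ (nums : List Int), Dom_verify_max_heap nums → Spec_verify_max_heap nums (verify_max_heap nums)

-- ===== LEMMAS AND PROOFS =====
theorem vmhGo_eq_all (nums : List Int) (n : Int) (l : List Int) :
    vmhGo nums n l = l.all (fun idx =>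
      !(decide (2*idx+1 < n ∧ PySem.List.pyGetD nums idx 0 < PySem.List.pyGetD nums (2*idx+1) 0)) &&
      !(decide (2*idx+2 < n ∧ PySem.List.pyGetD nums idx 0 < PySem.List.pyGetD nums (2*idx+2) 0))) := by
  induction l with
  | nil => rfl
  | cons idx rest ih =>
    simp only [vmhGo, List.all_cons]
    split_ifs with h1 h2
    · simp [h1]
    · simp [h2]
    · simp [h1, h2, ih]

theorem fd2 (a : Int) : PySem.Int.floordiv a 2 = a / 2 :=
  PySem.Int.floordiv_eq_ediv_of_pos (by norm_num)

-- ===== VERDICT (by name: the statement is the Claim_ definition above) =====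
theorem verify_max_heap_spec : Claim_equal_verify_max_heap := by
  intro nums _
  unfold Spec_verify_max_heap verify_max_heap verify_max_heap_alt
  rw [vmhGo_eq_all]
  rw [Bool.eq_iff_iff]
  simp only [List.all_eq_true, PySem.List.mem_pyRange_one, Bool.and_eq_true, Bool.not_eq_true',
    decide_eq_false_iff_not, fd2, not_and, not_lt]
  set n : Int := (nums.length : Int) with hn
  constructor
  · intro H i hi
    have hp1 : 0 ≤ (i-1)/2 := by omega
    have hp2 : (i-1)/2 < n/2 := by omega
    have := H ((i-1)/2) ⟨hp1, hp2⟩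
    rcases (by omega : i = 2*((i-1)/2)+1 ∨ i = 2*((i-1)/2)+2) with h | h
    · have h1 := this.1 (by omega); rw [← h] at h1; exact h1
    · have h1 := this.2 (by omega); rw [← h] at h1; exact h1
  · intro H p hp
    constructor
    · intro hc
      have := H (2*p+1) ⟨by omega, by omega⟩
      have he : (2*p+1-1)/2 = p := by omega
      rw [he] at this; exact this
    · intro hc
      have := H (2*p+2) ⟨by omega, by omega⟩
      have he : (2*p+2-1)/2 = p := by omega
      rw [he] at this; exact this
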